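-- pv_equiv track=rewrite | github.com/tanishabisht/Algorithms-Leetcode | ArraysAndHashing/easy-2475.py | unequalTriplets
-- ===== SOURCE A (Python) =====
-- from typing import List
--
-- def unequalTriplets(nums: List[int]) -> int:
--     count = 0
--     for i in range(len(nums)):
--         for j in range(i, len(nums)):
--             for k in range(j, len(nums)):
--                 if nums[i] != nums[j] and nums[j] != nums[k] and nums[i] != nums[k]:
--                     count += 1
--     return count
-- ===== SOURCE B (Python) =====
-- def unequalTriplets(nums):
--     # One pass: DP on prefixes with a value-frequency dict.
--     cnt = {}
--     ones = 0   # elements seen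
--     twos = 0   # pairs i<j with distinct values seen
--     threes = 0 # triplets i<j<k with pairwise-distinct values seen
--     for x in nums:
--         c = cnt.get(x, 0)
--         threes += twos - c * (ones - c)
--         twos += ones - c
--         ones += 1
--         cnt[x] = c + 1
--     return threes
-- ===== Notes on version B (the rewrite author's own statement) =====
-- stated objective: faster
-- what changed: Replaced A's cubic triple-nested index loop by a single left-to-right pass that maintains a value-frequency dict plus running counts of elements, distinct-value pairs and distinct-value triplets of the prefix.
import Mathlib
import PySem

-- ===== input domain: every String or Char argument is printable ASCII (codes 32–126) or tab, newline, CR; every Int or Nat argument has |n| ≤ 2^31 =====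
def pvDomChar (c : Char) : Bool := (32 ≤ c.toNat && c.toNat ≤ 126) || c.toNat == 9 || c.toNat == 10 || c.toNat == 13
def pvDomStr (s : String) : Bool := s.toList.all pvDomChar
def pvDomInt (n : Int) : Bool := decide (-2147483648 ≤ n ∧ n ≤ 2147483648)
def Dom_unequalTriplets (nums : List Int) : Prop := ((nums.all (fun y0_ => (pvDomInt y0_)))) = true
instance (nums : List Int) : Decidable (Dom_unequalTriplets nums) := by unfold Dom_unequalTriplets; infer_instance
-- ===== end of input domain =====

-- B replaces A's cubic triple loop by a one-pass frequency-dict DP (prefix counts of elements,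
-- distinct pairs and distinct triplets); objective: faster.

-- ===== PORT A =====
def unequalTriplets (nums : List Int) : Int :=
  (PySem.List.pyRange 0 (nums.length : Int) 1).foldl (fun count i =>
    (PySem.List.pyRange i (nums.length : Int) 1).foldl (fun count j =>
      (PySem.List.pyRange j (nums.length : Int) 1).foldl (fun count k =>
        if PySem.List.pyGetD nums i 0 ≠ PySem.List.pyGetD nums j 0 ∧
           PySem.List.pyGetD nums j 0 ≠ PySem.List.pyGetD nums k 0 ∧
           PySem.List.pyGetD nums i 0 ≠ PySem.List.pyGetD nums k 0
        then count + 1 else count) count) count) 0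

-- ===== PORT B =====
-- the body of B's single loop: state (cnt, ones, twos, threes)
def bStep (st : PySem.Dict Int Int × Int × Int × Int) (x : Int) :
    PySem.Dict Int Int × Int × Int × Int :=
  let cnt := st.1
  let ones := st.2.1
  let twos := st.2.2.1
  let threes := st.2.2.2
  let c := cnt.getD x 0
  (cnt.insert x (c + 1), ones + 1, twos + (ones - c), threes + (twos - c * (ones - c)))

def unequalTriplets_alt (nums : List Int) : Int :=
  (nums.foldl bStep (PySem.Dict.empty, 0, 0, 0)).2.2.2

-- ===== PRECONDITION & SPEC =====
def Spec_unequalTriplets (nums : List Int) (out : Int) : Prop := out = unequalTriplets_alt nums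
instance (nums : List Int) (out : Int) : Decidable (Spec_unequalTriplets nums out) := by unfold Spec_unequalTriplets; infer_instance

-- ===== CLAIM (what is proved, stated in full; the proofs are below) =====
def Claim_equal_unequalTriplets : Prop := ∀ (nums : List Int), Dom_unequalTriplets nums → Spec_unequalTriplets nums (unequalTriplets nums)

-- ===== LEMMAS AND PROOFS =====

-- #elements of l different from both x and y
def cnt3 (x y : Int) : List Int → Int
  | [] => 0
  | z :: l => (if z ≠ x ∧ z ≠ y then 1 else 0) + cnt3 x y l

-- #elements of l different from x
def cnt2 (x : Int) : List Int → Int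
  | [] => 0
  | z :: l => (if z ≠ x then 1 else 0) + cnt2 x l

-- #pairs j < k in l with values pairwise distinct and both different from x
def paQ (x : Int) : List Int → Int
  | [] => 0
  | y :: ys => (if x ≠ y then cnt3 x y ys else 0) + paQ x ys

-- #pairs i < j in l with distinct values
def p2Q : List Int → Int
  | [] => 0
  | y :: ys => cnt2 y ys + p2Q ys

-- #triplets i < j < k in l with pairwise distinct values
def tQ : List Int → Int
  | [] => 0
  | x :: xs => paQ x xs + tQ xs

-- the three loops of A, as structural recursion over suffixes of nums
def g3 (x y : Int) (l : List Int) (c : Int) : Int :=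
  l.foldl (fun s z => if x ≠ y ∧ y ≠ z ∧ x ≠ z then s + 1 else s) c

def g2 (x : Int) : List Int → Int → Int
  | [], c => c
  | y :: ys, c => g2 x ys (g3 x y (y :: ys) c)

def g1 : List Int → Int → Int
  | [], c => c
  | x :: xs, c => g1 xs (g2 x (x :: xs) c)

lemma cnt3_comm (x y : Int) (l : List Int) : cnt3 x y l = cnt3 y x l := by
  induction l with
  | nil => rfl
  | cons z l ih =>
    rw [cnt3, cnt3, ih]
    by_cases h1 : z = x <;> by_cases h2 : z = y <;> simp [h1, h2]

lemma cnt3_self (x y : Int) (l : List Int) : cnt3 x y (y :: l) = cnt3 x y l := by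
  rw [cnt3]; simp

lemma cnt2_len (x : Int) (l : List Int) :
    cnt2 x l = (l.length : Int) - (l.count x : Int) := by
  induction l with
  | nil => rfl
  | cons z l ih =>
    rw [cnt2, ih, List.count_cons]
    by_cases h : z = x <;> simp [h] <;> push_cast <;> omega

lemma cnt3_eq (x y : Int) (l : List Int) (h : x ≠ y) :
    cnt3 x y l = cnt2 y l - (l.count x : Int) := by
  induction l with
  | nil => rfl
  | cons z l ih =>
    rw [cnt3, cnt2, ih, List.count_cons]
    by_cases hz : z = x
    · subst hz; simp [h]; push_cast; omega
    · by_cases hy : z = y <;> simp [hz, hy] <;> push_cast <;> omega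

lemma cnt3_append (x y a : Int) (l : List Int) :
    cnt3 x y (l ++ [a]) = cnt3 x y l + (if a ≠ x ∧ a ≠ y then 1 else 0) := by
  induction l with
  | nil => simp [cnt3]
  | cons z l ih => rw [List.cons_append, cnt3, ih, cnt3]; ring

lemma cnt2_append (x a : Int) (l : List Int) :
    cnt2 x (l ++ [a]) = cnt2 x l + (if a ≠ x then 1 else 0) := by
  induction l with
  | nil => simp [cnt2]
  | cons z l ih => rw [List.cons_append, cnt2, ih, cnt2]; ring

-- A-side: unfolding the three foldl's
lemma g3_eq (x y : Int) (l : List Int) (c : Int) :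
    g3 x y l c = c + (if x ≠ y then cnt3 x y l else 0) := by
  induction l generalizing c with
  | nil => simp [g3, cnt3]
  | cons z l ih =>
    simp only [g3, List.foldl_cons] at *
    rw [ih, cnt3]
    by_cases hxy : x ≠ y
    · by_cases h1 : y ≠ z <;> by_cases h2 : x ≠ z <;>
        simp [hxy, h1, h2, eq_comm] <;> omega
    · simp [hxy]

lemma g2_eq (x : Int) (l : List Int) (c : Int) : g2 x l c = c + paQ x l := by
  induction l generalizing c with
  | nil => simp [g2, paQ]
  | cons y ys ih =>
    rw [g2, ih, g3_eq, paQ, cnt3_self]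
    by_cases h : x ≠ y <;> simp [h] <;> ring

lemma g1_eq (l : List Int) (c : Int) : g1 l c = c + tQ l := by
  induction l generalizing c with
  | nil => simp [g1, tQ]
  | cons x xs ih =>
    rw [g1, ih, g2_eq, tQ, paQ]
    simp; ring

-- the middle loop of A over indices [a, len) equals g2 on the suffix
lemma A_mid (nums : List Int) (x : Int) :
    ∀ (m : Nat) (a c : Int), 0 ≤ a → (nums.length : Int) - a ≤ (m : Int) →
    (PySem.List.pyRange a (nums.length : Int) 1).foldl (fun count j =>
      (PySem.List.pyRange j (nums.length : Int) 1).foldl (fun count k =>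
        if x ≠ PySem.List.pyGetD nums j 0 ∧
           PySem.List.pyGetD nums j 0 ≠ PySem.List.pyGetD nums k 0 ∧
           x ≠ PySem.List.pyGetD nums k 0
        then count + 1 else count) count) c
      = g2 x (nums.drop a.toNat) c := by
  intro m
  induction m with
  | zero =>
    intro a c ha hm
    have hge : (nums.length : Int) ≤ a := by omega
    rw [PySem.List.pyRange_one_eq_nil hge, List.drop_eq_nil_of_le (by omega : nums.length ≤ a.toNat)]
    rfl
  | succ m ih =>
    intro a c ha hm
    by_cases hlt : a < (nums.length : Int)
    · rw [PySem.List.pyRange_one_cons hlt, List.foldl_cons]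
      have hdrop : nums.drop a.toNat = nums[a.toNat] :: nums.drop (a.toNat + 1) :=
        List.drop_eq_getElem_cons (by omega)
      have hget : PySem.List.pyGetD nums a 0 = nums[a.toNat] :=
        PySem.List.pyGetD_eq_getElem nums 0 ha (by omega)
      have key : (PySem.List.pyRange a (nums.length : Int) 1).foldl (fun count k =>
          if x ≠ PySem.List.pyGetD nums a 0 ∧
             PySem.List.pyGetD nums a 0 ≠ PySem.List.pyGetD nums k 0 ∧
             x ≠ PySem.List.pyGetD nums k 0
          then count + 1 else count) c
          = g3 x (PySem.List.pyGetD nums a 0) (nums.drop a.toNat) c :=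
        PySem.List.foldl_pyRange_pyGetD' nums 0
          (fun s z => if x ≠ PySem.List.pyGetD nums a 0 ∧ PySem.List.pyGetD nums a 0 ≠ z ∧ x ≠ z
            then s + 1 else s) c ha
      rw [key]
      rw [ih (a + 1) (g3 x (PySem.List.pyGetD nums a 0) (nums.drop a.toNat) c) (by omega) (by omega)]
      have h1 : (a + 1).toNat = a.toNat + 1 := by omega
      rw [h1, hget, hdrop]
      conv_rhs => rw [g2]
    · have hge : (nums.length : Int) ≤ a := by omega
      rw [PySem.List.pyRange_one_eq_nil hge, List.drop_eq_nil_of_le (by omega : nums.length ≤ a.toNat)]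
      rfl

-- the outer loop of A over indices [a, len) equals g1 on the suffix
lemma A_out (nums : List Int) :
    ∀ (m : Nat) (a c : Int), 0 ≤ a → (nums.length : Int) - a ≤ (m : Int) →
    (PySem.List.pyRange a (nums.length : Int) 1).foldl (fun count i =>
      (PySem.List.pyRange i (nums.length : Int) 1).foldl (fun count j =>
        (PySem.List.pyRange j (nums.length : Int) 1).foldl (fun count k =>
          if PySem.List.pyGetD nums i 0 ≠ PySem.List.pyGetD nums j 0 ∧
             PySem.List.pyGetD nums j 0 ≠ PySem.List.pyGetD nums k 0 ∧
             PySem.List.pyGetD nums i 0 ≠ PySem.List.pyGetD nums k 0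
          then count + 1 else count) count) count) c
      = g1 (nums.drop a.toNat) c := by
  intro m
  induction m with
  | zero =>
    intro a c ha hm
    have hge : (nums.length : Int) ≤ a := by omega
    rw [PySem.List.pyRange_one_eq_nil hge, List.drop_eq_nil_of_le (by omega : nums.length ≤ a.toNat)]
    rfl
  | succ m ih =>
    intro a c ha hm
    by_cases hlt : a < (nums.length : Int)
    · rw [PySem.List.pyRange_one_cons hlt, List.foldl_cons]
      have hdrop : nums.drop a.toNat = nums[a.toNat] :: nums.drop (a.toNat + 1) :=
        List.drop_eq_getElem_cons (by omega)
      have hget : PySem.List.pyGetD nums a 0 = nums[a.toNat] :=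
        PySem.List.pyGetD_eq_getElem nums 0 ha (by omega)
      rw [A_mid nums (PySem.List.pyGetD nums a 0) (m + 1) a c ha (by push_cast; omega)]
      rw [ih (a + 1) (g2 (PySem.List.pyGetD nums a 0) (nums.drop a.toNat) c) (by omega) (by omega)]
      have h1 : (a + 1).toNat = a.toNat + 1 := by omega
      rw [h1, hget, hdrop]
      conv_rhs => rw [g1]
    · have hge : (nums.length : Int) ≤ a := by omega
      rw [PySem.List.pyRange_one_eq_nil hge, List.drop_eq_nil_of_le (by omega : nums.length ≤ a.toNat)]
      rfl

lemma A_eq_tQ (nums : List Int) : unequalTriplets nums = tQ nums := by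
  unfold unequalTriplets
  rw [A_out nums nums.length 0 0 (by omega) (by omega)]
  simp [g1_eq]

-- B-side: append characterisations of the prefix quantities
lemma p2Q_append (p : List Int) (a : Int) : p2Q (p ++ [a]) = p2Q p + cnt2 a p := by
  induction p with
  | nil => simp [p2Q, cnt2]
  | cons y ys ih =>
    rw [List.cons_append, p2Q, ih, cnt2_append, p2Q, cnt2]
    by_cases h : a = y <;> simp [h, Ne.symm] <;> ring

lemma paQ_append (x : Int) (l : List Int) (a : Int) :
    paQ x (l ++ [a]) = paQ x l + (if x ≠ a then cnt3 x a l else 0) := by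
  induction l with
  | nil => simp [paQ, cnt3]
  | cons y ys ih =>
    rw [List.cons_append, paQ, ih, cnt3_append, paQ]
    conv_rhs => rw [cnt3]
    by_cases hxy : x = y <;> by_cases hxa : x = a <;> by_cases hay : a = y <;>
      simp [hxy, hxa, hay, Ne.symm, eq_comm] <;> ring

lemma tQ_append (p : List Int) (a : Int) : tQ (p ++ [a]) = tQ p + paQ a p := by
  induction p with
  | nil => simp [tQ, paQ]
  | cons x xs ih =>
    rw [List.cons_append, tQ, ih, paQ_append, tQ]
    conv_rhs => rw [paQ]
    rw [cnt3_comm a x xs]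
    by_cases h : x = a
    · subst h; simp; ring
    · simp [h, Ne.symm h]; ring

-- paQ in terms of p2Q and counts (the DP recurrence)
lemma paQ_eq (a : Int) (p : List Int) :
    paQ a p = p2Q p - (p.count a : Int) * cnt2 a p := by
  induction p with
  | nil => simp [paQ, p2Q, cnt2]
  | cons y ys ih =>
    rw [paQ, p2Q, ih, List.count_cons, cnt2]
    by_cases h : y = a
    · subst h; simp [cnt2_len]; push_cast; ring
    · have h2 : a ≠ y := fun hh => h hh.symm
      rw [cnt3_eq a y ys h2]
      simp [h, h2]
      push_cast; ring

-- the counter update B performs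
lemma counter_insert (p : List Int) (x : Int) :
    (PySem.Dict.counter p).insert x ((PySem.Dict.counter p).getD x 0 + 1)
      = PySem.Dict.counter (p ++ [x]) := by
  rw [← PySem.Dict.foldl_insert_getD_add_one_eq_counter, ← PySem.Dict.foldl_insert_getD_add_one_eq_counter,
    List.foldl_append, List.foldl_cons, List.foldl_nil]

-- B's fold invariant
lemma B_inv (l : List Int) : ∀ (p : List Int),
    l.foldl bStep (PySem.Dict.counter p, (p.length : Int), p2Q p, tQ p)
    = (PySem.Dict.counter (p ++ l), ((p ++ l).length : Int), p2Q (p ++ l), tQ (p ++ l)) := by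
  induction l with
  | nil => simp
  | cons x xs ih =>
    intro p
    rw [List.foldl_cons]
    have hstep :
        bStep (PySem.Dict.counter p, (p.length : Int), p2Q p, tQ p) x
        = (PySem.Dict.counter (p ++ [x]), ((p ++ [x]).length : Int), p2Q (p ++ [x]), tQ (p ++ [x])) := by
      show ((PySem.Dict.counter p).insert x ((PySem.Dict.counter p).getD x 0 + 1),
        (p.length : Int) + 1,
        p2Q p + ((p.length : Int) - (PySem.Dict.counter p).getD x 0),
        tQ p + (p2Q p - (PySem.Dict.counter p).getD x 0 * ((p.length : Int) - (PySem.Dict.counter p).getD x 0))) = _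
      rw [counter_insert, PySem.Dict.getD_counter]
      have e2 : (p.length : Int) + 1 = ((p ++ [x]).length : Int) := by
        simp
      have e3 : p2Q p + ((p.length : Int) - (p.count x : Int)) = p2Q (p ++ [x]) := by
        rw [p2Q_append, cnt2_len]
      have e4 : tQ p + (p2Q p - (p.count x : Int) * ((p.length : Int) - (p.count x : Int)))
          = tQ (p ++ [x]) := by
        rw [tQ_append, paQ_eq, cnt2_len]
        try ring
      rw [e2, e3, e4]
    rw [hstep, ih (p ++ [x])]
    simp

lemma B_eq_tQ (nums : List Int) : unequalTriplets_alt nums = tQ nums := by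
  unfold unequalTriplets_alt
  have h0 : ((PySem.Dict.empty, 0, 0, 0) : PySem.Dict Int Int × Int × Int × Int)
      = (PySem.Dict.counter ([] : List Int), (([] : List Int).length : Int), p2Q [], tQ []) := rfl
  rw [h0, B_inv nums []]
  simp

-- ===== VERDICT (by name: the statement is the Claim_ definition above) =====
theorem unequalTriplets_spec : Claim_equal_unequalTriplets := by
  intro nums _
  unfold Spec_unequalTriplets
  rw [A_eq_tQ, B_eq_tQ]
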